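-- pv_equiv track=rewrite | github.com/6desislava6/Hack-Bulgaria | Hack-first-week/Wednesday/bombing2.py | positions_as_tuples
-- ===== SOURCE A (Python) =====
-- def positions_as_tuples(m):
--     rows = len(m)
--     cols = len(m[0])
--     positions = ()
--     for i in range(0, rows):
--         for j in range(0, cols):
--             positions += ((i, j), )
--     return positions
-- ===== SOURCE B (Python) =====
-- def positions_as_tuples(m):
--     rows = len(m)
--     cols = len(m[0])
--     if cols == 0:
--         return ()
--     out = []
--     i = 0
--     j = 0
--     while i < rows:
--         out.append((i, j))
--         if j + 1 == cols:
--             i += 1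
--             j = 0
--         else:
--             j += 1
--     return tuple(out)
-- ===== Notes on version B (the rewrite author's own statement) =====
-- stated objective: alternative
-- what changed: Replaces the two nested for-loops with repeated quadratic tuple concatenation by a single odometer-style while loop over one (i, j) counter pair with carry, appending to a list and converting to a tuple once at the end.
import Mathlib
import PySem

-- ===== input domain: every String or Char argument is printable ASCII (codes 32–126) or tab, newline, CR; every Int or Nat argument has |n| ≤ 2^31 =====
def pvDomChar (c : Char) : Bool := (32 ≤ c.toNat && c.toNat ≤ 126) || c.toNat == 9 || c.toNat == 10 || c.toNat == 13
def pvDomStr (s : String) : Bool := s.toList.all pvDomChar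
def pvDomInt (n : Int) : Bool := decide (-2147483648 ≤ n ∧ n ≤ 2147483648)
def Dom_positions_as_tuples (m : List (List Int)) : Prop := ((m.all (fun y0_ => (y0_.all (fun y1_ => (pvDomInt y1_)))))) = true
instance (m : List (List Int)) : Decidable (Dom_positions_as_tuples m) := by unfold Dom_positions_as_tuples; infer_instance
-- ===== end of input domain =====

-- B replaces A's nested for-loops (quadratic tuple concatenation) by one odometer-style
-- while loop over a single (i, j) counter pair with carry; objective: alternative/faster.

-- ===== PORT A =====
def positions_as_tuples (m : List (List Int)) : List (List Int) :=
  let rows : Int := m.length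
  let cols : Int := (((PySem.List.pyGet? m 0).getD []).length : Int)  -- m[0]; none (IndexError on empty m) excluded by Pre_
  (PySem.List.pyRange 0 rows 1).foldl (fun positions i =>
    (PySem.List.pyRange 0 cols 1).foldl (fun positions j =>
      positions ++ [[i, j]]) positions) []

-- ===== PORT B =====
-- the while loop, ported with fuel (rows*cols + 1 steps always suffice; 0 < cols is
-- guaranteed by the early return in Source B)
def pvOdoLoop : Nat → Nat → Nat → Nat → Nat → List (List Int) → List (List Int)
  | 0, _, _, _, _, out => out
  | fuel + 1, rows, cols, i, j, out =>
    if i < rows then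
      let out := out ++ [[(i : Int), (j : Int)]]
      if j + 1 = cols then pvOdoLoop fuel rows cols (i + 1) 0 out
      else pvOdoLoop fuel rows cols i (j + 1) out
    else out

def positions_as_tuples_alt (m : List (List Int)) : List (List Int) :=
  let rows : Nat := m.length
  let cols : Nat := ((PySem.List.pyGet? m 0).getD []).length  -- m[0]; none (IndexError on empty m) excluded by Pre_
  if cols = 0 then []
  else pvOdoLoop (rows * cols + 1) rows cols 0 0 []

-- ===== PRECONDITION & SPEC =====
-- Pre_ excludes only the empty matrix, on which both Python A and Python B raise IndexError at m[0].
def Pre_positions_as_tuples (m : List (List Int)) : Prop := m ≠ []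
instance (m : List (List Int)) : Decidable (Pre_positions_as_tuples m) := by unfold Pre_positions_as_tuples; infer_instance
def pvWitness_positions_as_tuples : List (List Int) := [[1, 2], [3, 4]]

def Spec_positions_as_tuples (m : List (List Int)) (out : List (List Int)) : Prop := out = positions_as_tuples_alt m
instance (m : List (List Int)) (out : List (List Int)) : Decidable (Spec_positions_as_tuples m out) := by unfold Spec_positions_as_tuples; infer_instance

-- ===== CLAIM (what is proved, stated in full; the proofs are below) =====
def Claim_equal_positions_as_tuples : Prop := ∀ (m : List (List Int)), Dom_positions_as_tuples m → Pre_positions_as_tuples m → Spec_positions_as_tuples m (positions_as_tuples m)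

-- ===== LEMMAS AND PROOFS =====

-- the row-major list of all positions, as a nested flatMap over Nat ranges
def pvSpec (rows cols : Nat) : List (List Int) :=
  (List.range rows).flatMap (fun i : Nat => (List.range cols).map (fun j : Nat => [(i : Int), (j : Int)]))

-- what remains to be produced when the odometer stands at row i, column j
def pvTail (rows cols i j : Nat) : List (List Int) :=
  ((List.range' j (cols - j)).map (fun k : Nat => [(i : Int), (k : Int)])) ++
  (List.range' (i + 1) (rows - (i + 1))).flatMap
    (fun r : Nat => (List.range cols).map (fun k : Nat => [(r : Int), (k : Int)]))

-- appending one element per step is mapping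
lemma foldl_snoc {α β : Type} (f : α → β) (l : List α) (acc : List β) :
    l.foldl (fun p x => p ++ [f x]) acc = acc ++ l.map f := by
  induction l generalizing acc with
  | nil => simp
  | cons x xs ih => simp [ih]

-- appending one block per step is flatMap
lemma foldl_blocks {α β : Type} (g : α → List β) (l : List α) (acc : List β) :
    l.foldl (fun p x => p ++ g x) acc = acc ++ l.flatMap g := by
  induction l generalizing acc with
  | nil => simp
  | cons x xs ih => simp [ih]

-- the odometer loop, given enough fuel, appends exactly the remaining tail
lemma pvOdoLoop_eq (rows cols : Nat) (hc : 0 < cols) :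
    ∀ fuel i j out, j < cols → (rows - i) * cols - j ≤ fuel →
      pvOdoLoop fuel rows cols i j out =
        out ++ (if i < rows then pvTail rows cols i j else []) := by
  intro fuel
  induction fuel with
  | zero =>
      intro i j out hj hf
      by_cases hi : i < rows
      · exfalso
        have h1 : cols ≤ (rows - i) * cols := Nat.le_mul_of_pos_left _ (by omega)
        omega
      · simp [pvOdoLoop, hi]
  | succ fuel ih =>
      intro i j out hj hf
      by_cases hi : i < rows
      · simp only [pvOdoLoop, if_pos hi]
        have h1 : cols ≤ (rows - i) * cols := Nat.le_mul_of_pos_left _ (by omega)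
        by_cases hjc : j + 1 = cols
        · rw [if_pos hjc, ih (i + 1) 0 _ hc (by
            have h2 : (rows - (i + 1)) * cols + cols = (rows - i) * cols := by
              have : rows - i = (rows - (i + 1)) + 1 := by omega
              rw [this]; ring
            omega)]
          by_cases hi1 : i + 1 < rows
          · rw [if_pos hi1]
            have hcj : cols - j = 1 := by omega
            have hr : rows - (i + 1) = (rows - (i + 1 + 1)) + 1 := by omega
            simp [pvTail, hcj, hr, List.range'_succ, List.range_eq_range',
              List.flatMap_cons]
          · rw [if_neg hi1]
            have h0 : rows - (i + 1) = 0 := by omega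
            have hcj : cols - j = 1 := by omega
            simp [pvTail, h0, hcj]
        · rw [if_neg hjc, ih i (j + 1) _ (by omega) (by omega), if_pos hi]
          simp only [pvTail, List.append_assoc]
          congr 1
          have : cols - j = (cols - (j + 1)) + 1 := by omega
          rw [this, List.range'_succ]
          simp
      · simp [pvOdoLoop, hi]

-- the full odometer run produces the row-major spec
lemma odoRun_eq_spec (rows cols : Nat) (hc : 0 < cols) :
    pvOdoLoop (rows * cols + 1) rows cols 0 0 [] = pvSpec rows cols := by
  rw [pvOdoLoop_eq rows cols hc _ 0 0 [] hc (by simp)]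
  by_cases hr : 0 < rows
  · rw [if_pos hr]
    have hcons : List.range rows = 0 :: List.range' 1 (rows - 1) := by
      rw [List.range_eq_range']
      conv_lhs => rw [show rows = (rows - 1) + 1 from by omega]
      rw [List.range'_succ]
    simp [pvTail, pvSpec, hcons, List.flatMap_cons, List.range_eq_range']
  · have h0 : rows = 0 := by omega
    simp [h0, pvSpec]

-- A's nested folds also produce the row-major spec
lemma aPort_eq_spec (rows cols : Nat) :
    (PySem.List.pyRange 0 (rows : Int) 1).foldl (fun positions i =>
      (PySem.List.pyRange 0 (cols : Int) 1).foldl (fun positions j =>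
        positions ++ [[i, j]]) positions) [] = pvSpec rows cols := by
  simp only [foldl_snoc, foldl_blocks]
  rw [PySem.List.pyRange_zero_natCast, PySem.List.pyRange_zero_natCast]
  simp only [pvSpec, List.flatMap_map, List.map_map, Function.comp_def, List.nil_append]

-- ===== VERDICT (by name: the statement is the Claim_ definition above) =====
theorem positions_as_tuples_spec : Claim_equal_positions_as_tuples := by
  intro m _ _
  unfold Spec_positions_as_tuples positions_as_tuples positions_as_tuples_alt
  rw [aPort_eq_spec m.length ((PySem.List.pyGet? m 0).getD []).length]
  by_cases hc : ((PySem.List.pyGet? m 0).getD []).length = 0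
  · simp [hc, pvSpec]
  · rw [if_neg hc, odoRun_eq_spec _ _ (by omega)]
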